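-- pv_equiv track=rewrite | github.com/yujinii59/AlgorithmPractice | 프로그래머스/unrated/133499. 옹알이 （2）/옹알이 （2）.py | solution
-- ===== SOURCE A (Python) =====
-- def solution(babbling):
--     answer = 0
--     pron = ["aya", "ye", "woo", "ma"]
--     for word in babbling:
--         for p in pron:
--             if p * 2 not in word:
--                 word = word.replace(p, ' ')
--         if word.strip() == '':
--             answer += 1
--     return answer
-- ===== SOURCE B (Python) =====
-- # Single forward parse per word instead of A's four replace+strip passes:
-- # scan left-to-right, match the unique piece by its first letter, reject a
-- # piece equal to the previous one; whitespace separates (and resets) pieces.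
-- PIECES = {'a': 'aya', 'y': 'ye', 'w': 'woo', 'm': 'ma'}
--
--
-- def solution(babbling):
--     total = 0
--     for word in babbling:
--         i = 0
--         prev = None
--         ok = True
--         while ok and i < len(word):
--             c = word[i]
--             if c.isspace():
--                 prev = None
--                 i += 1
--                 continue
--             p = PIECES.get(c)
--             if p is None or p == prev or not word.startswith(p, i):
--                 ok = False
--             else:
--                 prev = p
--                 i += len(p)
--         if ok:
--             total += 1
--     return total
-- ===== Notes on version B (the rewrite author's own statement) =====
-- stated objective: faster
-- what changed: Replaces A's four global replace-and-then-strip passes per word by a single left-to-right parse that matches each piece by its unique first letter, rejects a piece equal to the previous one, and treats whitespace as a separator.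
import Mathlib
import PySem

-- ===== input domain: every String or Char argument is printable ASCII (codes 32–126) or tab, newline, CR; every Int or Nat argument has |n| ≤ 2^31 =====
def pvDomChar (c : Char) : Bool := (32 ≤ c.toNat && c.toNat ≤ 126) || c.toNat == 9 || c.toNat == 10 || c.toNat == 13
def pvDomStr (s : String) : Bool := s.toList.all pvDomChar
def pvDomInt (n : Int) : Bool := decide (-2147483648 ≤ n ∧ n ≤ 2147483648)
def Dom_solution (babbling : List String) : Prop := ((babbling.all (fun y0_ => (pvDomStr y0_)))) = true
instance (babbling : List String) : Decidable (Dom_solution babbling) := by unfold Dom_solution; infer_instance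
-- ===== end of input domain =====

-- One honest line: B parses each word left-to-right by the unique piece starting
-- at each position (whitespace separates pieces) instead of A's four replace+strip passes.

-- ===== PORT A =====
def solution (babbling : List String) : Int :=
  babbling.foldl (fun answer word =>
    let word := ["aya", "ye", "woo", "ma"].foldl
      (fun w p => if PySem.Str.isIn (p ++ p) w then w else PySem.Str.replace w p " ") word
    if PySem.Str.strip word == "" then answer + 1 else answer) 0

-- ===== PORT B =====
-- PIECES.get(c) from Source B
def pieceGet (c : Char) : Option (List Char) :=
  if c = 'a' then some ['a', 'y', 'a']
  else if c = 'y' then some ['y', 'e']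
  else if c = 'w' then some ['w', 'o', 'o']
  else if c = 'm' then some ['m', 'a']
  else none

-- the while-loop of Source B: `rem` is the part of the word from index i on
def solGo : Option (List Char) → List Char → Bool
  | _, [] => true
  | prev, c :: rem =>
    if PySem.Chars.isspace c then solGo none rem
    else
      match pieceGet c with
      | none => false
      | some p =>
        if some p == prev then false
        else if PySem.Chars.startswith (c :: rem) p then
          solGo (some p) (rem.drop (p.length - 1))
        else false
termination_by _ rem => rem.length
decreasing_by
  · simp
  · simp

def solution_alt (babbling : List String) : Int :=
  babbling.foldl (fun total word => if solGo none word.toList then total + 1 else total) 0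

-- ===== PRECONDITION & SPEC =====
def Spec_solution (babbling : List String) (out : Int) : Prop := out = solution_alt babbling
instance (babbling : List String) (out : Int) : Decidable (Spec_solution babbling out) := by unfold Spec_solution; infer_instance

-- ===== CLAIM (what is proved, stated in full; the proofs are below) =====
def Claim_equal_solution : Prop := ∀ (babbling : List String), Dom_solution babbling → Spec_solution babbling (solution babbling)

-- ===== LEMMAS AND PROOFS =====

-- the four pieces as character lists
def pA : List Char := ['a', 'y', 'a']
def pY : List Char := ['y', 'e']
def pW : List Char := ['w', 'o', 'o']
def pM : List Char := ['m', 'a']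

-- structural version of Python's str.replace(q, ' ') (for nonempty q)
def rep (q : List Char) : List Char → List Char
  | [] => []
  | c :: t => if q.isPrefixOf (c :: t) then ' ' :: rep q (t.drop (q.length - 1)) else c :: rep q t
termination_by l => l.length
decreasing_by
  · simp
  · simp

def allSp (w : List Char) : Bool := w.all PySem.Chars.isspace

-- the A-side per-word computation, on characters
def aw (w : List Char) : Bool :=
  let r1 := if PySem.Chars.isIn (pA ++ pA) w then w else rep pA w
  let r2 := if PySem.Chars.isIn (pY ++ pY) r1 then r1 else rep pY r1
  let r3 := if PySem.Chars.isIn (pW ++ pW) r2 then r2 else rep pW r2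
  let r4 := if PySem.Chars.isIn (pM ++ pM) r3 then r3 else rep pM r3
  decide (PySem.Chars.strip r4 = [])

-- linearized form: unconditional replaces plus the four no-doubled-piece conditions
def lin (w : List Char) : Bool :=
  !PySem.Chars.isIn (pA ++ pA) w &&
  !PySem.Chars.isIn (pY ++ pY) (rep pA w) &&
  !PySem.Chars.isIn (pW ++ pW) (rep pY (rep pA w)) &&
  !PySem.Chars.isIn (pM ++ pM) (rep pW (rep pY (rep pA w))) &&
  allSp (rep pM (rep pW (rep pY (rep pA w))))

-- token-level representation: a word is (ideally) a sequence of pieces and whitespace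
inductive Pc where
  | A | Y | W | M
deriving DecidableEq

inductive Item where
  | pc : Pc → Item
  | sp : Char → Item
deriving DecidableEq

def pcs : Pc → List Char
  | .A => pA
  | .Y => pY
  | .W => pW
  | .M => pM

def emit : List Item → List Char
  | [] => []
  | .pc p :: r => pcs p ++ emit r
  | .sp c :: r => c :: emit r

def wsOk (its : List Item) : Bool :=
  its.all fun it => match it with | .sp c => PySem.Chars.isspace c | .pc _ => true

def onlyIn (al : List Pc) (its : List Item) : Bool :=
  its.all fun it => match it with | .sp _ => true | .pc p => al.contains p

def mapSt (q : Pc) (its : List Item) : List Item :=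
  its.map fun it => if it = .pc q then .sp ' ' else it

def noAdj (q : Pc) : List Item → Bool
  | [] => true
  | x :: r => if x = .pc q ∧ r.head? = some (.pc q) then false else noAdj q r

def okDup : Option (List Char) → List Item → Bool
  | _, [] => true
  | _, .sp _ :: r => okDup none r
  | prev, .pc p :: r => if some (pcs p) == prev then false else okDup (some (pcs p)) r

-- ---- bridges to PySem primitives ----

theorem rep_go (q : List Char) (hq : q ≠ []) :
    ∀ fuel l acc, l.length ≤ fuel →
      PySem.Chars.replace.go q [' '] fuel l acc = acc.reverse ++ rep q l := by
  intro fuel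
  induction fuel with
  | zero =>
    intro l acc h
    have hl : l = [] := by simpa using h
    subst hl
    rw [PySem.Chars.replace.go, rep]
  | succ n ih =>
    intro l acc h
    cases l with
    | nil =>
      rw [PySem.Chars.replace.go, rep]
      simp
      omega
    | cons c t =>
      have hlen : t.length ≤ n := by
        simp only [List.length_cons] at h; omega
      rw [PySem.Chars.replace.go, rep]
      by_cases hp : q.isPrefixOf (c :: t)
      · simp only [hp, if_true]
        obtain ⟨k, hk⟩ : ∃ k, q.length = k + 1 := ⟨q.length - 1, by
          have := List.length_pos_iff.mpr hq; omega⟩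
        have hdrop : List.drop q.length (c :: t) = List.drop (q.length - 1) t := by
          rw [hk]; simp
        rw [hdrop]
        rw [ih _ _ (by simp only [List.length_drop]; omega)]
        simp
      · simp only [hp]
        rw [ih _ _ hlen]
        simp

theorem replace_eq_rep (q w : List Char) (hq : q ≠ []) :
    PySem.Chars.replace w q [' '] = rep q w := by
  rw [PySem.Chars.replace]
  simp [List.isEmpty_iff, hq]
  exact (by simpa using rep_go q hq w.length w [] le_rfl)

theorem strip_eq_nil_iff (w : List Char) : PySem.Chars.strip w = [] ↔ allSp w = true := by
  rw [PySem.Chars.strip, PySem.Chars.rstrip, PySem.Chars.lstrip]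
  constructor
  · intro h
    have h2 : List.dropWhile PySem.Chars.isspace (List.dropWhile PySem.Chars.isspace w).reverse = [] := by
      rcases List.eq_nil_or_concat (List.dropWhile PySem.Chars.isspace (List.dropWhile PySem.Chars.isspace w).reverse) with h' | ⟨l, a, h'⟩
      · exact h'
      · rw [h'] at h; simp at h
    have hall2 : ∀ c ∈ (List.dropWhile PySem.Chars.isspace w).reverse, PySem.Chars.isspace c := by
      simpa [List.dropWhile_eq_nil_iff] using h2
    have hall : ∀ c ∈ w, PySem.Chars.isspace c = true := by
      intro c hc
      rcases List.mem_append.mp ((List.takeWhile_append_dropWhile (p := PySem.Chars.isspace) (l := w)) ▸ hc) with h' | h'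
      · exact List.mem_takeWhile_imp h'
      · exact hall2 c (by simpa using h')
    simpa [allSp, List.all_eq_true] using hall
  · intro h
    have hall : ∀ c ∈ w, PySem.Chars.isspace c = true := by
      simpa [allSp, List.all_eq_true] using h
    have h1 : List.dropWhile PySem.Chars.isspace w = [] := by
      rw [List.dropWhile_eq_nil_iff]; exact fun x hx => hall x hx
    rw [h1]
    simp


-- ---- generic infix splitting ----

theorem infix_split {t x y : List Char} (h : t <:+: x ++ y) :
    (∃ j < x.length, t <+: x.drop j ++ y) ∨ t <:+: y := by
  obtain ⟨u, v, huv⟩ := h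
  by_cases hle : x.length ≤ u.length
  · right
    have hy := congrArg (List.drop x.length) huv
    rw [List.drop_append_of_le_length (by simp; omega),
      List.drop_append_of_le_length hle, List.drop_left] at hy
    exact ⟨_, _, hy⟩
  · left
    refine ⟨u.length, by omega, ?_⟩
    have hy := congrArg (List.drop u.length) huv
    rw [List.drop_append_of_le_length (by simp), List.drop_left,
      List.drop_append_of_le_length (by omega)] at hy
    exact ⟨v, hy⟩

-- ---- emit shape lemmas ----

theorem emit_append (a b : List Item) : emit (a ++ b) = emit a ++ emit b := by
  induction a with
  | nil => simp [emit]
  | cons it r ih =>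
    cases it with
    | pc p => simp [emit, ih]
    | sp c => simp [emit, ih]

theorem emit_head_a {its : List Item} {l : List Char} (hws : wsOk its = true)
    (h : emit its = 'a' :: l) : ∃ r, its = .pc .A :: r ∧ l = 'y' :: 'a' :: emit r := by
  cases its with
  | nil => simp [emit] at h
  | cons it r =>
    cases it with
    | pc p =>
      cases p <;> simp [emit, pcs, pA, pY, pW, pM] at h
      exact ⟨r, rfl, h.symm⟩
    | sp c =>
      simp [wsOk] at hws
      simp [emit] at h
      rw [h.1] at hws
      simp [PySem.Chars.isspace] at hws

theorem emit_head_y {its : List Item} {l : List Char} (hws : wsOk its = true)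
    (h : emit its = 'y' :: l) : ∃ r, its = .pc .Y :: r ∧ l = 'e' :: emit r := by
  cases its with
  | nil => simp [emit] at h
  | cons it r =>
    cases it with
    | pc p =>
      cases p <;> simp [emit, pcs, pA, pY, pW, pM] at h
      exact ⟨r, rfl, h.symm⟩
    | sp c =>
      simp [wsOk] at hws
      simp [emit] at h
      rw [h.1] at hws
      simp [PySem.Chars.isspace] at hws

theorem notYA {its : List Item} (hws : wsOk its = true) : ¬ ['y', 'a'] <+: emit its := by
  intro h
  obtain ⟨t, ht⟩ := h
  obtain ⟨r, _, hl⟩ := emit_head_y hws (by rw [← ht]; rfl)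
  simp at hl

-- ---- forward: rep computes token-wise ----


theorem rep_skip_ne {d : Char} {q' : List Char} {c : Char} (t : List Char) (h : d ≠ c) :
    rep (d :: q') (c :: t) = c :: rep (d :: q') t := by
  have hc : ¬ ((d :: q').isPrefixOf (c :: t)) = true := by
    simp only [List.isPrefixOf_iff_prefix, List.cons_prefix_cons]
    rintro ⟨he, -⟩
    exact h he
  rw [rep]
  simp [hc]

theorem rep_tok_A (t : List Char) : rep pA (pA ++ t) = ' ' :: rep pA t := by
  rw [show pA ++ t = 'a' :: 'y' :: 'a' :: t from by simp [pA], rep]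
  simp [pA, List.isPrefixOf]

theorem rep_tok_Y (t : List Char) : rep pY (pY ++ t) = ' ' :: rep pY t := by
  rw [show pY ++ t = 'y' :: 'e' :: t from by simp [pY], rep]
  simp [pY, List.isPrefixOf]

theorem rep_tok_W (t : List Char) : rep pW (pW ++ t) = ' ' :: rep pW t := by
  rw [show pW ++ t = 'w' :: 'o' :: 'o' :: t from by simp [pW], rep]
  simp [pW, List.isPrefixOf]

theorem rep_tok_M (t : List Char) : rep pM (pM ++ t) = ' ' :: rep pM t := by
  rw [show pM ++ t = 'm' :: 'a' :: t from by simp [pM], rep]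
  simp [pM, List.isPrefixOf]

theorem rep_pA_a {t : List Char} (h : ¬ ['y', 'a'] <+: t) :
    rep pA ('a' :: t) = 'a' :: rep pA t := by
  rw [rep]
  have : ¬ pA.isPrefixOf ('a' :: t) = true := by
    simp [pA, List.isPrefixOf_iff_prefix]
    intro h1
    exact h h1
  simp [this]

theorem mapSt_cons (q : Pc) (it : Item) (r : List Item) :
    mapSt q (it :: r) = (if it = .pc q then .sp ' ' else it) :: mapSt q r := by
  simp [mapSt]

theorem rep_pA_skip {c : Char} (h : 'a' ≠ c) (t : List Char) :
    rep pA (c :: t) = c :: rep pA t := rep_skip_ne t h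

theorem rep_pY_skip {c : Char} (h : 'y' ≠ c) (t : List Char) :
    rep pY (c :: t) = c :: rep pY t := rep_skip_ne t h

theorem rep_pW_skip {c : Char} (h : 'w' ≠ c) (t : List Char) :
    rep pW (c :: t) = c :: rep pW t := rep_skip_ne t h

theorem rep_pM_skip {c : Char} (h : 'm' ≠ c) (t : List Char) :
    rep pM (c :: t) = c :: rep pM t := rep_skip_ne t h

theorem ws_ne {c d : Char} (hc : PySem.Chars.isspace c = true)
    (hd : PySem.Chars.isspace d = false) : d ≠ c := by
  intro he
  rw [he, hc] at hd
  simp at hd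

-- ---- C lemma section ----
theorem C_A {its : List Item} (hws : wsOk its = true) :
    rep pA (emit its) = emit (mapSt .A its) := by
  induction its with
  | nil => simp [emit, mapSt, rep]
  | cons it rest ih =>
    cases it with
    | sp c =>
      simp only [wsOk, List.all_cons, Bool.and_eq_true] at hws
      rw [mapSt_cons]
      have h2 : emit ((if Item.sp c = Item.pc Pc.A then Item.sp ' ' else Item.sp c) :: mapSt Pc.A rest) = c :: emit (mapSt Pc.A rest) := by simp [emit]
      have h1 : emit (Item.sp c :: rest) = c :: emit rest := by simp [emit]
      rw [h1, h2, rep_pA_skip (ws_ne hws.1 (by decide)) _, ih hws.2]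
    | pc p =>
      simp only [wsOk, List.all_cons, Bool.and_eq_true] at hws
      have hws' := hws.2
      rw [mapSt_cons]
      cases p with
      | A =>
        have h1 : emit (Item.pc Pc.A :: rest) = pA ++ emit rest := by simp [emit, pcs]
        have h2 : emit ((if Item.pc Pc.A = Item.pc Pc.A then Item.sp ' ' else Item.pc Pc.A) :: mapSt Pc.A rest) = ' ' :: emit (mapSt Pc.A rest) := by simp [emit]
        rw [h1, h2, rep_tok_A, ih hws']
      | Y =>
        have h1 : emit (Item.pc Pc.Y :: rest) = 'y' :: 'e' :: emit rest := by simp [emit, pcs, pY]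
        have h2 : emit ((if Item.pc Pc.Y = Item.pc Pc.A then Item.sp ' ' else Item.pc Pc.Y) :: mapSt Pc.A rest) = 'y' :: 'e' :: emit (mapSt Pc.A rest) := by simp [emit, pcs, pY]
        rw [h1, h2, rep_pA_skip (by decide), rep_pA_skip (by decide), ih hws']
      | W =>
        have h1 : emit (Item.pc Pc.W :: rest) = 'w' :: 'o' :: 'o' :: emit rest := by simp [emit, pcs, pW]
        have h2 : emit ((if Item.pc Pc.W = Item.pc Pc.A then Item.sp ' ' else Item.pc Pc.W) :: mapSt Pc.A rest) = 'w' :: 'o' :: 'o' :: emit (mapSt Pc.A rest) := by simp [emit, pcs, pW]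
        rw [h1, h2, rep_pA_skip (by decide), rep_pA_skip (by decide), rep_pA_skip (by decide), ih hws']
      | M =>
        have h1 : emit (Item.pc Pc.M :: rest) = 'm' :: 'a' :: emit rest := by simp [emit, pcs, pM]
        have h2 : emit ((if Item.pc Pc.M = Item.pc Pc.A then Item.sp ' ' else Item.pc Pc.M) :: mapSt Pc.A rest) = 'm' :: 'a' :: emit (mapSt Pc.A rest) := by simp [emit, pcs, pM]
        rw [h1, h2, rep_pA_skip (by decide), rep_pA_a (notYA hws'), ih hws']

theorem C_Y {its : List Item} (hws : wsOk its = true) (hal : onlyIn [.Y, .W, .M] its = true) :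
    rep pY (emit its) = emit (mapSt .Y its) := by
  induction its with
  | nil => simp [emit, mapSt, rep]
  | cons it rest ih =>
    simp only [wsOk, List.all_cons, Bool.and_eq_true] at hws
    simp only [onlyIn, List.all_cons, Bool.and_eq_true] at hal
    rw [mapSt_cons]
    cases it with
    | sp c =>
      have h1 : emit (Item.sp c :: rest) = c :: emit rest := by simp [emit]
      have h2 : emit ((if Item.sp c = Item.pc Pc.Y then Item.sp ' ' else Item.sp c) :: mapSt Pc.Y rest) = c :: emit (mapSt Pc.Y rest) := by simp [emit]
      rw [h1, h2, rep_pY_skip (ws_ne hws.1 (by decide)) _, ih hws.2 hal.2]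
    | pc p =>
      cases p with
      | A => simp [List.contains_eq_mem] at hal
      | Y =>
        have h1 : emit (Item.pc Pc.Y :: rest) = pY ++ emit rest := by simp [emit, pcs]
        have h2 : emit ((if Item.pc Pc.Y = Item.pc Pc.Y then Item.sp ' ' else Item.pc Pc.Y) :: mapSt Pc.Y rest) = ' ' :: emit (mapSt Pc.Y rest) := by simp [emit]
        rw [h1, h2, rep_tok_Y, ih hws.2 hal.2]
      | W =>
        have h1 : emit (Item.pc Pc.W :: rest) = 'w' :: 'o' :: 'o' :: emit rest := by simp [emit, pcs, pW]
        have h2 : emit ((if Item.pc Pc.W = Item.pc Pc.Y then Item.sp ' ' else Item.pc Pc.W) :: mapSt Pc.Y rest) = 'w' :: 'o' :: 'o' :: emit (mapSt Pc.Y rest) := by simp [emit, pcs, pW]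
        rw [h1, h2, rep_pY_skip (by decide), rep_pY_skip (by decide), rep_pY_skip (by decide), ih hws.2 hal.2]
      | M =>
        have h1 : emit (Item.pc Pc.M :: rest) = 'm' :: 'a' :: emit rest := by simp [emit, pcs, pM]
        have h2 : emit ((if Item.pc Pc.M = Item.pc Pc.Y then Item.sp ' ' else Item.pc Pc.M) :: mapSt Pc.Y rest) = 'm' :: 'a' :: emit (mapSt Pc.Y rest) := by simp [emit, pcs, pM]
        rw [h1, h2, rep_pY_skip (by decide), rep_pY_skip (by decide), ih hws.2 hal.2]

theorem C_W {its : List Item} (hws : wsOk its = true) (hal : onlyIn [.W, .M] its = true) :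
    rep pW (emit its) = emit (mapSt .W its) := by
  induction its with
  | nil => simp [emit, mapSt, rep]
  | cons it rest ih =>
    simp only [wsOk, List.all_cons, Bool.and_eq_true] at hws
    simp only [onlyIn, List.all_cons, Bool.and_eq_true] at hal
    rw [mapSt_cons]
    cases it with
    | sp c =>
      have h1 : emit (Item.sp c :: rest) = c :: emit rest := by simp [emit]
      have h2 : emit ((if Item.sp c = Item.pc Pc.W then Item.sp ' ' else Item.sp c) :: mapSt Pc.W rest) = c :: emit (mapSt Pc.W rest) := by simp [emit]
      rw [h1, h2, rep_pW_skip (ws_ne hws.1 (by decide)) _, ih hws.2 hal.2]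
    | pc p =>
      cases p with
      | A => simp [List.contains_eq_mem] at hal
      | Y => simp [List.contains_eq_mem] at hal
      | W =>
        have h1 : emit (Item.pc Pc.W :: rest) = pW ++ emit rest := by simp [emit, pcs]
        have h2 : emit ((if Item.pc Pc.W = Item.pc Pc.W then Item.sp ' ' else Item.pc Pc.W) :: mapSt Pc.W rest) = ' ' :: emit (mapSt Pc.W rest) := by simp [emit]
        rw [h1, h2, rep_tok_W, ih hws.2 hal.2]
      | M =>
        have h1 : emit (Item.pc Pc.M :: rest) = 'm' :: 'a' :: emit rest := by simp [emit, pcs, pM]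
        have h2 : emit ((if Item.pc Pc.M = Item.pc Pc.W then Item.sp ' ' else Item.pc Pc.M) :: mapSt Pc.W rest) = 'm' :: 'a' :: emit (mapSt Pc.W rest) := by simp [emit, pcs, pM]
        rw [h1, h2, rep_pW_skip (by decide), rep_pW_skip (by decide), ih hws.2 hal.2]

theorem C_M {its : List Item} (hws : wsOk its = true) (hal : onlyIn [.M] its = true) :
    rep pM (emit its) = emit (mapSt .M its) := by
  induction its with
  | nil => simp [emit, mapSt, rep]
  | cons it rest ih =>
    simp only [wsOk, List.all_cons, Bool.and_eq_true] at hws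
    simp only [onlyIn, List.all_cons, Bool.and_eq_true] at hal
    rw [mapSt_cons]
    cases it with
    | sp c =>
      have h1 : emit (Item.sp c :: rest) = c :: emit rest := by simp [emit]
      have h2 : emit ((if Item.sp c = Item.pc Pc.M then Item.sp ' ' else Item.sp c) :: mapSt Pc.M rest) = c :: emit (mapSt Pc.M rest) := by simp [emit]
      rw [h1, h2, rep_pM_skip (ws_ne hws.1 (by decide)) _, ih hws.2 hal.2]
    | pc p =>
      cases p with
      | A => simp [List.contains_eq_mem] at hal
      | Y => simp [List.contains_eq_mem] at hal
      | W => simp [List.contains_eq_mem] at hal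
      | M =>
        have h1 : emit (Item.pc Pc.M :: rest) = pM ++ emit rest := by simp [emit, pcs]
        have h2 : emit ((if Item.pc Pc.M = Item.pc Pc.M then Item.sp ' ' else Item.pc Pc.M) :: mapSt Pc.M rest) = ' ' :: emit (mapSt Pc.M rest) := by simp [emit]
        rw [h1, h2, rep_tok_M, ih hws.2 hal.2]

theorem wsOk_mapSt (q : Pc) {its : List Item} (h : wsOk its = true) :
    wsOk (mapSt q its) = true := by
  induction its with
  | nil => simp [mapSt, wsOk]
  | cons it rest ih =>
    simp only [wsOk, List.all_cons, Bool.and_eq_true] at h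
    rw [mapSt_cons]
    simp only [wsOk, List.all_cons, Bool.and_eq_true]
    refine ⟨?_, ih h.2⟩
    by_cases he : it = .pc q
    · simp [he, PySem.Chars.isspace]
    · simp only [he, if_false]
      exact h.1

theorem onlyIn_mapA (its : List Item) : onlyIn [.Y, .W, .M] (mapSt .A its) = true := by
  induction its with
  | nil => simp [mapSt, onlyIn]
  | cons it rest ih =>
    rw [mapSt_cons]
    simp only [onlyIn, List.all_cons, Bool.and_eq_true] at ih ⊢
    refine ⟨?_, ih⟩
    cases it with
    | sp c => simp
    | pc p => cases p <;> simp

theorem onlyIn_mapY {its : List Item} (h : onlyIn [.Y, .W, .M] its = true) :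
    onlyIn [.W, .M] (mapSt .Y its) = true := by
  induction its with
  | nil => simp [mapSt, onlyIn]
  | cons it rest ih =>
    simp only [onlyIn, List.all_cons, Bool.and_eq_true] at h
    rw [mapSt_cons]
    simp only [onlyIn, List.all_cons, Bool.and_eq_true]
    refine ⟨?_, ih h.2⟩
    cases it with
    | sp c => simp
    | pc p =>
      have := h.1
      cases p <;> simp_all [List.contains_eq_mem]

theorem onlyIn_mapW {its : List Item} (h : onlyIn [.W, .M] its = true) :
    onlyIn [.M] (mapSt .W its) = true := by
  induction its with
  | nil => simp [mapSt, onlyIn]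
  | cons it rest ih =>
    simp only [onlyIn, List.all_cons, Bool.and_eq_true] at h
    rw [mapSt_cons]
    simp only [onlyIn, List.all_cons, Bool.and_eq_true]
    refine ⟨?_, ih h.2⟩
    cases it with
    | sp c => simp
    | pc p =>
      have := h.1
      cases p <;> simp_all [List.contains_eq_mem]

theorem onlyIn_mapM {its : List Item} (h : onlyIn [.M] its = true) :
    onlyIn [] (mapSt .M its) = true := by
  induction its with
  | nil => simp [mapSt, onlyIn]
  | cons it rest ih =>
    simp only [onlyIn, List.all_cons, Bool.and_eq_true] at h
    rw [mapSt_cons]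
    simp only [onlyIn, List.all_cons, Bool.and_eq_true]
    refine ⟨?_, ih h.2⟩
    cases it with
    | sp c => simp
    | pc p =>
      have := h.1
      cases p <;> simp_all [List.contains_eq_mem]

theorem allSp_emit {its : List Item} (hws : wsOk its = true) (h0 : onlyIn [] its = true) :
    allSp (emit its) = true := by
  induction its with
  | nil => simp [emit, allSp]
  | cons it rest ih =>
    simp only [wsOk, List.all_cons, Bool.and_eq_true] at hws
    simp only [onlyIn, List.all_cons, Bool.and_eq_true] at h0
    cases it with
    | sp c =>
      simp only [emit, allSp, List.all_cons, Bool.and_eq_true]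
      exact ⟨hws.1, ih hws.2 h0.2⟩
    | pc p => cases p <;> simp [List.contains_eq_mem] at h0

theorem exists_items_of_allSp {w : List Char} (h : allSp w = true) :
    ∃ its, wsOk its = true ∧ onlyIn [] its = true ∧ emit its = w := by
  refine ⟨w.map Item.sp, ?_, ?_, ?_⟩
  · simp only [wsOk, List.all_map]
    simpa [allSp, Function.comp] using h
  · simp [onlyIn, List.all_map, Function.comp]
  · have hgen : ∀ v : List Char, emit (v.map Item.sp) = v := by
      intro v
      induction v with
      | nil => simp [emit]
      | cons c t ih => simp [emit, ih]
    exact hgen w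

-- ---- pullback: a replaced image in the language pulls back ----

theorem rep_walk (q : List Char) :
    ∀ b u v, (∀ c ∈ b, PySem.Chars.isspace c = false) → rep q v = b ++ u →
      ∃ v', v = b ++ v' ∧ u = rep q v' := by
  intro b
  induction b with
  | nil => exact fun u v _ h => ⟨v, rfl, h.symm⟩
  | cons d b' ih =>
    intro u v hns h
    cases v with
    | nil => rw [rep] at h; simp at h
    | cons c t =>
      rw [rep] at h
      by_cases hp : q.isPrefixOf (c :: t)
      · rw [if_pos hp] at h
        have hd : d = ' ' := by
          have := congrArg List.head? h
          simpa using this.symm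
        have := hns d (List.mem_cons_self)
        rw [hd] at this
        simp [PySem.Chars.isspace] at this
      · rw [if_neg hp] at h
        simp only [List.cons_append, List.cons.injEq] at h
        obtain ⟨rfl, h2⟩ := h
        obtain ⟨v', hv1, hv2⟩ := ih u t (fun x hx => hns x (List.mem_cons_of_mem _ hx)) h2
        exact ⟨v', by rw [hv1]; simp, hv2⟩

theorem emit_eq_nil {its : List Item} (h : emit its = []) : its = [] := by
  cases its with
  | nil => rfl
  | cons it rest =>
    cases it with
    | pc p => cases p <;> simp [emit, pcs, pA, pY, pW, pM] at h
    | sp c => simp [emit] at h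

theorem pcs_ne_nil (p : Pc) : pcs p ≠ [] := by
  cases p <;> simp [pcs, pA, pY, pW, pM]

theorem pcs_nonspace (p : Pc) : ∀ y ∈ pcs p, PySem.Chars.isspace y = false := by
  cases p <;> intro y hy <;> simp [pcs, pA, pY, pW, pM] at hy <;>
    first
      | (rcases hy with rfl | rfl | rfl <;> decide)
      | (rcases hy with rfl | rfl <;> decide)

theorem PB (q : Pc) (al : List Pc) (hq : q ∉ al) :
    ∀ v its, wsOk its = true → onlyIn al its = true → emit its = rep (pcs q) v →
      ∃ its', wsOk its' = true ∧ onlyIn (q :: al) its' = true ∧ emit its' = v ∧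
        mapSt q its' = its := by
  suffices H : ∀ n v its, v.length ≤ n → wsOk its = true → onlyIn al its = true →
      emit its = rep (pcs q) v →
      ∃ its', wsOk its' = true ∧ onlyIn (q :: al) its' = true ∧ emit its' = v ∧
        mapSt q its' = its by
    exact fun v its => H v.length v its le_rfl
  intro n
  induction n with
  | zero =>
    intro v its hlen hws hal hemit
    have hv : v = [] := by
      cases v with
      | nil => rfl
      | cons c t => simp at hlen
    subst hv
    rw [rep] at hemit
    have : its = [] := emit_eq_nil hemit
    subst this
    exact ⟨[], rfl, rfl, rfl, rfl⟩
  | succ n ihn =>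
    intro v its hlen hws hal hemit
    cases v with
    | nil =>
      rw [rep] at hemit
      have : its = [] := emit_eq_nil hemit
      subst this
      exact ⟨[], rfl, rfl, rfl, rfl⟩
    | cons c t =>
      rw [rep] at hemit
      by_cases hp : (pcs q).isPrefixOf (c :: t)
      · rw [if_pos hp] at hemit
        cases its with
        | nil => simp [emit] at hemit
        | cons it rest =>
          cases it with
          | pc p => cases p <;> simp [emit, pcs, pA, pY, pW, pM] at hemit
          | sp d =>
            simp only [emit, List.cons.injEq] at hemit
            obtain ⟨hd, hrest⟩ := hemit
            simp only [wsOk, List.all_cons, Bool.and_eq_true] at hws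
            simp only [onlyIn, List.all_cons, Bool.and_eq_true] at hal
            obtain ⟨its', h1, h2, h3, h4⟩ := ihn (t.drop ((pcs q).length - 1)) rest
              (by simp only [List.length_drop]; simp only [List.length_cons] at hlen; omega)
              hws.2 hal.2 hrest
            have hpre : c :: t = pcs q ++ t.drop ((pcs q).length - 1) := by
              obtain ⟨r, hr⟩ := List.isPrefixOf_iff_prefix.mp hp
              obtain ⟨k, hk⟩ : ∃ k, (pcs q).length = k + 1 :=
                ⟨(pcs q).length - 1, by have := List.length_pos_iff.mpr (pcs_ne_nil q); omega⟩
              have hdrop := congrArg (List.drop (pcs q).length) hr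
              rw [List.drop_left] at hdrop
              rw [← hr]
              congr 1
              rw [hdrop, hk]
              simp
            refine ⟨.pc q :: its', ?_, ?_, ?_, ?_⟩
            · simp only [wsOk, List.all_cons, Bool.and_eq_true]
              exact ⟨by simp, h1⟩
            · simp only [onlyIn, List.all_cons, Bool.and_eq_true]
              refine ⟨by simp, h2⟩
            · rw [show emit (Item.pc q :: its') = pcs q ++ emit its' from by simp [emit], h3]
              exact hpre.symm
            · rw [mapSt_cons, if_pos rfl, h4, ← hd]
      · rw [if_neg hp] at hemit
        cases its with
        | nil => simp [emit] at hemit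
        | cons it rest =>
          simp only [wsOk, List.all_cons, Bool.and_eq_true] at hws
          simp only [onlyIn, List.all_cons, Bool.and_eq_true] at hal
          cases it with
          | sp d =>
            simp only [emit, List.cons.injEq] at hemit
            obtain ⟨hd, hrest⟩ := hemit
            obtain ⟨its', h1, h2, h3, h4⟩ := ihn t rest
              (by simp only [List.length_cons] at hlen; omega) hws.2 hal.2 hrest
            refine ⟨.sp d :: its', ?_, ?_, ?_, ?_⟩
            · simp only [wsOk, List.all_cons, Bool.and_eq_true]
              exact ⟨hws.1, h1⟩
            · simp only [onlyIn, List.all_cons, Bool.and_eq_true]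
              exact ⟨by simp, h2⟩
            · rw [show emit (Item.sp d :: its') = d :: emit its' from by simp [emit], h3, hd]
            · rw [mapSt_cons, if_neg (by simp), h4]
          | pc p =>
            have hpq : p ≠ q := by
              intro he
              subst he
              exact hq (by simpa [List.contains_eq_mem] using hal.1)
            obtain ⟨d, b', hpc⟩ : ∃ d b', pcs p = d :: b' := by
              cases p <;> exact ⟨_, _, rfl⟩
            rw [show emit (Item.pc p :: rest) = pcs p ++ emit rest from by simp [emit], hpc]
              at hemit
            simp only [List.cons_append, List.cons.injEq] at hemit
            obtain ⟨hdc, hb2⟩ := hemit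
            have hb3 : ∀ x ∈ b', PySem.Chars.isspace x = false := by
              intro x hx
              exact pcs_nonspace p x (by rw [hpc]; exact List.mem_cons_of_mem _ hx)
            obtain ⟨v'', hv1, hv2⟩ := rep_walk (pcs q) b' (emit rest) t hb3 hb2.symm
            obtain ⟨its', h1, h2, h3, h4⟩ := ihn v'' rest
              (by
                subst hv1
                simp only [List.length_cons, List.length_append] at hlen ⊢
                omega)
              hws.2 hal.2 hv2
            have hmem : p ∈ al := by simpa [List.contains_eq_mem] using hal.1
            refine ⟨.pc p :: its', ?_, ?_, ?_, ?_⟩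
            · simp only [wsOk, List.all_cons, Bool.and_eq_true]
              exact ⟨by simp, h1⟩
            · simp only [onlyIn, List.all_cons, Bool.and_eq_true]
              refine ⟨?_, h2⟩
              simp [List.contains_eq_mem, hmem]
            · rw [show emit (Item.pc p :: its') = pcs p ++ emit its' from by simp [emit], h3,
                hpc, hv1, hdc]
              simp
            · rw [mapSt_cons, if_neg (by simp [hpq]), h4]

-- ---- parser ↔ items ----

theorem parse_emit : ∀ its prev, wsOk its = true → solGo prev (emit its) = okDup prev its := by
  intro its
  induction its with
  | nil => intro prev _; rw [show emit [] = [] from rfl, solGo, okDup]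
  | cons it rest ih =>
    intro prev hws
    simp only [wsOk, List.all_cons, Bool.and_eq_true] at hws
    cases it with
    | sp c =>
      rw [show emit (Item.sp c :: rest) = c :: emit rest from by simp [emit], solGo, okDup]
      rw [if_pos hws.1]
      exact ih none hws.2
    | pc p =>
      cases p with
      | A =>
        have he : emit (Item.pc Pc.A :: rest) = 'a' :: 'y' :: 'a' :: emit rest := by simp [emit, pcs, pA]
        rw [he, solGo, okDup]
        rw [if_neg (by decide : ¬ PySem.Chars.isspace 'a' = true)]
        rw [show pieceGet 'a' = some ['a','y','a'] from rfl, show pcs Pc.A = ['a','y','a'] from rfl]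
        simp only []
        by_cases hb : (some ['a','y','a'] == prev) = true
        · rw [if_pos hb, if_pos hb]
        · rw [if_neg hb, if_neg hb]
          rw [if_pos (by simp [PySem.Chars.startswith, List.isPrefixOf] :
            PySem.Chars.startswith ('a' :: 'y' :: 'a' :: emit rest) ['a','y','a'] = true)]
          rw [show (('y' :: 'a' :: emit rest).drop ((['a','y','a']).length - 1)) = emit rest from by simp]
          exact ih (some ['a','y','a']) hws.2
      | Y =>
        have he : emit (Item.pc Pc.Y :: rest) = 'y' :: 'e' :: emit rest := by simp [emit, pcs, pY]
        rw [he, solGo, okDup]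
        rw [if_neg (by decide : ¬ PySem.Chars.isspace 'y' = true)]
        rw [show pieceGet 'y' = some ['y','e'] from rfl, show pcs Pc.Y = ['y','e'] from rfl]
        simp only []
        by_cases hb : (some ['y','e'] == prev) = true
        · rw [if_pos hb, if_pos hb]
        · rw [if_neg hb, if_neg hb]
          rw [if_pos (by simp [PySem.Chars.startswith, List.isPrefixOf] :
            PySem.Chars.startswith ('y' :: 'e' :: emit rest) ['y','e'] = true)]
          rw [show (('e' :: emit rest).drop ((['y','e']).length - 1)) = emit rest from by simp]
          exact ih (some ['y','e']) hws.2
      | W =>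
        have he : emit (Item.pc Pc.W :: rest) = 'w' :: 'o' :: 'o' :: emit rest := by simp [emit, pcs, pW]
        rw [he, solGo, okDup]
        rw [if_neg (by decide : ¬ PySem.Chars.isspace 'w' = true)]
        rw [show pieceGet 'w' = some ['w','o','o'] from rfl, show pcs Pc.W = ['w','o','o'] from rfl]
        simp only []
        by_cases hb : (some ['w','o','o'] == prev) = true
        · rw [if_pos hb, if_pos hb]
        · rw [if_neg hb, if_neg hb]
          rw [if_pos (by simp [PySem.Chars.startswith, List.isPrefixOf] :
            PySem.Chars.startswith ('w' :: 'o' :: 'o' :: emit rest) ['w','o','o'] = true)]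
          rw [show (('o' :: 'o' :: emit rest).drop ((['w','o','o']).length - 1)) = emit rest from by simp]
          exact ih (some ['w','o','o']) hws.2
      | M =>
        have he : emit (Item.pc Pc.M :: rest) = 'm' :: 'a' :: emit rest := by simp [emit, pcs, pM]
        rw [he, solGo, okDup]
        rw [if_neg (by decide : ¬ PySem.Chars.isspace 'm' = true)]
        rw [show pieceGet 'm' = some ['m','a'] from rfl, show pcs Pc.M = ['m','a'] from rfl]
        simp only []
        by_cases hb : (some ['m','a'] == prev) = true
        · rw [if_pos hb, if_pos hb]
        · rw [if_neg hb, if_neg hb]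
          rw [if_pos (by simp [PySem.Chars.startswith, List.isPrefixOf] :
            PySem.Chars.startswith ('m' :: 'a' :: emit rest) ['m','a'] = true)]
          rw [show (('a' :: emit rest).drop ((['m','a']).length - 1)) = emit rest from by simp]
          exact ih (some ['m','a']) hws.2

theorem parse_items : ∀ w prev, solGo prev w = true →
    ∃ its, wsOk its = true ∧ emit its = w ∧ okDup prev its = true := by
  suffices H : ∀ n w prev, w.length ≤ n → solGo prev w = true →
      ∃ its, wsOk its = true ∧ emit its = w ∧ okDup prev its = true by
    exact fun w prev => H w.length w prev le_rfl
  intro n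
  induction n with
  | zero =>
    intro w prev hlen _
    have : w = [] := by cases w with
      | nil => rfl
      | cons c t => simp at hlen
    subst this
    exact ⟨[], rfl, rfl, rfl⟩
  | succ n ihn =>
    intro w prev hlen h
    cases w with
    | nil => exact ⟨[], rfl, rfl, rfl⟩
    | cons c rem =>
      simp only [List.length_cons] at hlen
      rw [solGo] at h
      by_cases hc : PySem.Chars.isspace c = true
      · rw [if_pos hc] at h
        obtain ⟨its, h1, h2, h3⟩ := ihn rem none (by omega) h
        refine ⟨.sp c :: its, ?_, ?_, ?_⟩
        · simp only [wsOk, List.all_cons, Bool.and_eq_true]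
          exact ⟨hc, h1⟩
        · rw [show emit (Item.sp c :: its) = c :: emit its from by simp [emit], h2]
        · rw [okDup]
          exact h3
      · rw [if_neg hc] at h
        by_cases hca : c = 'a'
        · subst hca
          rw [show pieceGet 'a' = some ['a','y','a'] from rfl] at h
          simp only [] at h
          by_cases hb : (some ['a','y','a'] == prev) = true
          · rw [if_pos hb] at h; simp at h
          · rw [if_neg hb] at h
            by_cases hs : PySem.Chars.startswith ('a' :: rem) ['a','y','a'] = true
            · rw [if_pos hs] at h
              obtain ⟨r, hr⟩ := List.isPrefixOf_iff_prefix.mp hs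
              have hrem : rem = 'y' :: 'a' :: r := by simpa using hr.symm
              have hdrop : rem.drop ((['a','y','a']).length - 1) = r := by rw [hrem]; simp
              rw [hdrop] at h
              obtain ⟨its, h1, h2, h3⟩ := ihn r (some ['a','y','a'])
                (by rw [hrem] at hlen; simp at hlen ⊢; omega) h
              refine ⟨.pc Pc.A :: its, ?_, ?_, ?_⟩
              · simp only [wsOk, List.all_cons, Bool.and_eq_true]
                exact ⟨by simp, h1⟩
              · rw [show emit (Item.pc Pc.A :: its) = ['a','y','a'] ++ emit its from by
                  simp [emit, pcs, pA], h2, hrem]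
                simp
              · rw [okDup, show pcs Pc.A = ['a','y','a'] from rfl, if_neg hb]
                exact h3
            · rw [if_neg hs] at h; simp at h
        by_cases hcy : c = 'y'
        · subst hcy
          rw [show pieceGet 'y' = some ['y','e'] from rfl] at h
          simp only [] at h
          by_cases hb : (some ['y','e'] == prev) = true
          · rw [if_pos hb] at h; simp at h
          · rw [if_neg hb] at h
            by_cases hs : PySem.Chars.startswith ('y' :: rem) ['y','e'] = true
            · rw [if_pos hs] at h
              obtain ⟨r, hr⟩ := List.isPrefixOf_iff_prefix.mp hs
              have hrem : rem = 'e' :: r := by simpa using hr.symm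
              have hdrop : rem.drop ((['y','e']).length - 1) = r := by rw [hrem]; simp
              rw [hdrop] at h
              obtain ⟨its, h1, h2, h3⟩ := ihn r (some ['y','e'])
                (by rw [hrem] at hlen; simp at hlen ⊢; omega) h
              refine ⟨.pc Pc.Y :: its, ?_, ?_, ?_⟩
              · simp only [wsOk, List.all_cons, Bool.and_eq_true]
                exact ⟨by simp, h1⟩
              · rw [show emit (Item.pc Pc.Y :: its) = ['y','e'] ++ emit its from by
                  simp [emit, pcs, pY], h2, hrem]
                simp
              · rw [okDup, show pcs Pc.Y = ['y','e'] from rfl, if_neg hb]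
                exact h3
            · rw [if_neg hs] at h; simp at h
        by_cases hcw : c = 'w'
        · subst hcw
          rw [show pieceGet 'w' = some ['w','o','o'] from rfl] at h
          simp only [] at h
          by_cases hb : (some ['w','o','o'] == prev) = true
          · rw [if_pos hb] at h; simp at h
          · rw [if_neg hb] at h
            by_cases hs : PySem.Chars.startswith ('w' :: rem) ['w','o','o'] = true
            · rw [if_pos hs] at h
              obtain ⟨r, hr⟩ := List.isPrefixOf_iff_prefix.mp hs
              have hrem : rem = 'o' :: 'o' :: r := by simpa using hr.symm
              have hdrop : rem.drop ((['w','o','o']).length - 1) = r := by rw [hrem]; simp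
              rw [hdrop] at h
              obtain ⟨its, h1, h2, h3⟩ := ihn r (some ['w','o','o'])
                (by rw [hrem] at hlen; simp at hlen ⊢; omega) h
              refine ⟨.pc Pc.W :: its, ?_, ?_, ?_⟩
              · simp only [wsOk, List.all_cons, Bool.and_eq_true]
                exact ⟨by simp, h1⟩
              · rw [show emit (Item.pc Pc.W :: its) = ['w','o','o'] ++ emit its from by
                  simp [emit, pcs, pW], h2, hrem]
                simp
              · rw [okDup, show pcs Pc.W = ['w','o','o'] from rfl, if_neg hb]
                exact h3
            · rw [if_neg hs] at h; simp at h
        by_cases hcm : c = 'm'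
        · subst hcm
          rw [show pieceGet 'm' = some ['m','a'] from rfl] at h
          simp only [] at h
          by_cases hb : (some ['m','a'] == prev) = true
          · rw [if_pos hb] at h; simp at h
          · rw [if_neg hb] at h
            by_cases hs : PySem.Chars.startswith ('m' :: rem) ['m','a'] = true
            · rw [if_pos hs] at h
              obtain ⟨r, hr⟩ := List.isPrefixOf_iff_prefix.mp hs
              have hrem : rem = 'a' :: r := by simpa using hr.symm
              have hdrop : rem.drop ((['m','a']).length - 1) = r := by rw [hrem]; simp
              rw [hdrop] at h
              obtain ⟨its, h1, h2, h3⟩ := ihn r (some ['m','a'])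
                (by rw [hrem] at hlen; simp at hlen ⊢; omega) h
              refine ⟨.pc Pc.M :: its, ?_, ?_, ?_⟩
              · simp only [wsOk, List.all_cons, Bool.and_eq_true]
                exact ⟨by simp, h1⟩
              · rw [show emit (Item.pc Pc.M :: its) = ['m','a'] ++ emit its from by
                  simp [emit, pcs, pM], h2, hrem]
                simp
              · rw [okDup, show pcs Pc.M = ['m','a'] from rfl, if_neg hb]
                exact h3
            · rw [if_neg hs] at h; simp at h
        · rw [show pieceGet c = none from by simp [pieceGet, hca, hcy, hcw, hcm]] at h
          simp at h

-- ---- duplicate-adjacency machinery ----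

theorem adj_okDup_false (q : Pc) : ∀ xs ys prev,
    okDup prev (xs ++ .pc q :: .pc q :: ys) = false := by
  intro xs
  induction xs with
  | nil =>
    intro ys prev
    by_cases hp : (some (pcs q) == prev) = true
    · simp [okDup, hp]
    · simp [okDup, hp]
  | cons x xs ih =>
    intro ys prev
    cases x with
    | sp c => simpa [okDup] using ih ys none
    | pc p =>
      by_cases hp : (some (pcs p) == prev) = true
      · simp [okDup, hp]
      · simpa [okDup, hp] using ih ys (some (pcs p))

theorem pcs_inj : ∀ p q : Pc, pcs p = pcs q → p = q := by
  intro p q h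
  cases p <;> cases q <;> first
    | rfl
    | simp [pcs, pA, pY, pW, pM] at h

theorem okDup_false_adj : ∀ its prev, okDup prev its = false →
    (∃ q xs ys, its = xs ++ .pc q :: .pc q :: ys) ∨
    (∃ q, prev = some (pcs q) ∧ its.head? = some (.pc q)) := by
  intro its
  induction its with
  | nil => intro prev h; simp [okDup] at h
  | cons it rest ih =>
    intro prev h
    cases it with
    | sp c =>
      rw [show okDup prev (Item.sp c :: rest) = okDup none rest from by simp [okDup]] at h
      rcases ih none h with ⟨q, xs, ys, hd⟩ | ⟨q, hq, -⟩
      · exact Or.inl ⟨q, Item.sp c :: xs, ys, by rw [hd]; rfl⟩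
      · simp at hq
    | pc p =>
      by_cases hp : (some (pcs p) == prev) = true
      · refine Or.inr ⟨p, ?_, rfl⟩
        have : some (pcs p) = prev := by simpa using hp
        exact this.symm
      · have hne : (some (pcs p) == prev) = false := Bool.eq_false_iff.mpr hp
        rw [show okDup prev (Item.pc p :: rest) = okDup (some (pcs p)) rest from by
          rw [okDup, hne]; simp] at h
        rcases ih _ h with ⟨q, xs, ys, hd⟩ | ⟨q, hq, hh⟩
        · exact Or.inl ⟨q, Item.pc p :: xs, ys, by rw [hd]; rfl⟩
        · have : p = q := pcs_inj _ _ (by simpa using hq)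
          subst this
          cases rest with
          | nil => simp at hh
          | cons r rs =>
            simp at hh
            rw [hh]
            exact Or.inl ⟨p, [], rs, rfl⟩

theorem noAdj_false_decomp {q : Pc} : ∀ {its}, noAdj q its = false →
    ∃ xs ys, its = xs ++ .pc q :: .pc q :: ys := by
  intro its
  induction its with
  | nil => intro h; simp [noAdj] at h
  | cons it rest ih =>
    intro h
    rw [noAdj] at h
    by_cases hc : it = Item.pc q ∧ rest.head? = some (Item.pc q)
    · obtain ⟨h1, h2⟩ := hc
      cases rest with
      | nil => simp at h2
      | cons r rs =>
        simp at h2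
        exact ⟨[], rs, by rw [h1, h2]; simp⟩
    · rw [if_neg hc] at h
      obtain ⟨xs, ys, hd⟩ := ih h
      exact ⟨it :: xs, ys, by rw [hd]; rfl⟩

theorem okDup_noAdj {its : List Item} (h : okDup none its = true) (q : Pc) :
    noAdj q its = true := by
  by_contra hn
  obtain ⟨xs, ys, hd⟩ := noAdj_false_decomp (Bool.eq_false_iff.mpr hn)
  rw [hd, adj_okDup_false q xs ys none] at h
  exact Bool.false_ne_true h

theorem noAdj_mapSt {q q' : Pc} (_hne : q ≠ q') {its : List Item}
    (h : noAdj q its = true) : noAdj q (mapSt q' its) = true := by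
  induction its with
  | nil => simp [mapSt, noAdj]
  | cons it rest ih =>
    rw [noAdj] at h
    by_cases hc : it = Item.pc q ∧ rest.head? = some (Item.pc q)
    · rw [if_pos hc] at h; exact absurd h (by simp)
    · rw [if_neg hc] at h
      rw [mapSt_cons, noAdj]
      rw [if_neg ?_]
      · exact ih h
      · rintro ⟨h1, h2⟩
        apply hc
        constructor
        · by_cases he : it = Item.pc q'
          · rw [he] at h1; simp at h1
          · rwa [if_neg he] at h1
        · cases rest with
          | nil => simp [mapSt] at h2
          | cons r rs =>
            rw [show mapSt q' (r :: rs) = (if r = .pc q' then .sp ' ' else r) :: mapSt q' rs from by simp [mapSt]] at h2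
            simp only [List.head?_cons, Option.some.injEq] at h2 ⊢
            by_cases he : r = Item.pc q'
            · rw [if_pos he] at h2; simp at h2
            · rwa [if_neg he] at h2

-- ---- no doubled piece in a duplicate-free token word ----

theorem noAdj_tail {q : Pc} {it : Item} {rest : List Item}
    (h : noAdj q (it :: rest) = true) : noAdj q rest = true := by
  rw [noAdj] at h
  by_cases hc : it = Item.pc q ∧ rest.head? = some (Item.pc q)
  · rw [if_pos hc] at h; simp at h
  · rwa [if_neg hc] at h

theorem noAdj_head {q : Pc} {rest : List Item}
    (h : noAdj q (Item.pc q :: rest) = true) : rest.head? ≠ some (Item.pc q) := by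
  intro hh
  rw [noAdj, if_pos ⟨rfl, hh⟩] at h
  simp at h

theorem emit_head_w {its : List Item} {l : List Char} (hws : wsOk its = true)
    (h : emit its = 'w' :: l) : ∃ r, its = .pc .W :: r ∧ l = 'o' :: 'o' :: emit r := by
  cases its with
  | nil => simp [emit] at h
  | cons it r =>
    cases it with
    | pc p =>
      cases p <;> simp [emit, pcs, pA, pY, pW, pM] at h
      exact ⟨r, rfl, h.symm⟩
    | sp c =>
      simp [wsOk] at hws
      simp [emit] at h
      rw [h.1] at hws
      simp [PySem.Chars.isspace] at hws

theorem emit_head_m {its : List Item} {l : List Char} (hws : wsOk its = true)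
    (h : emit its = 'm' :: l) : ∃ r, its = .pc .M :: r ∧ l = 'a' :: emit r := by
  cases its with
  | nil => simp [emit] at h
  | cons it r =>
    cases it with
    | pc p =>
      cases p <;> simp [emit, pcs, pA, pY, pW, pM] at h
      exact ⟨r, rfl, h.symm⟩
    | sp c =>
      simp [wsOk] at hws
      simp [emit] at h
      rw [h.1] at hws
      simp [PySem.Chars.isspace] at hws

theorem NC_A {its : List Item} (hws : wsOk its = true) (hna : noAdj .A its = true) :
    PySem.Chars.isIn (pA ++ pA) (emit its) = false := by
  rw [PySem.Chars.isIn_eq_false_iff]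
  revert hws hna
  induction its with
  | nil => intro _ _; simp [emit, pA]
  | cons it rest ih =>
    intro hws hna
    simp only [wsOk, List.all_cons, Bool.and_eq_true] at hws
    have hna' := noAdj_tail hna
    intro hinf
    cases it with
    | sp c =>
      rw [show emit (Item.sp c :: rest) = [c] ++ emit rest from by simp [emit]] at hinf
      rcases infix_split hinf with ⟨j, hj, hpre⟩ | hinf'
      · simp only [List.length_cons, List.length_nil] at hj
        interval_cases j
        simp only [List.drop, List.cons_append, List.nil_append] at hpre
        simp [pA, List.cons_prefix_cons] at hpre
        rw [← hpre.1] at hws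
        simp [PySem.Chars.isspace] at hws
      · exact ih hws.2 hna' hinf'
    | pc p =>
      cases p with
      | A =>
        rw [show emit (Item.pc Pc.A :: rest) = ['a','y','a'] ++ emit rest from by
          simp [emit, pcs, pA]] at hinf
        rcases infix_split hinf with ⟨j, hj, hpre⟩ | hinf'
        · simp only [List.length_cons, List.length_nil] at hj
          interval_cases j <;>
            simp only [List.drop, List.cons_append, List.nil_append] at hpre <;>
            simp [pA, List.cons_prefix_cons] at hpre
          -- j = 0 : hpre : ['a','y','a'] <+: emit rest ; j = 2 : hpre : ['y','a','a','y','a'] <+: emit rest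
          · obtain ⟨tl, htl⟩ := hpre
            obtain ⟨rr, hits, -⟩ := emit_head_a hws.2 htl.symm
            exact noAdj_head hna (by rw [hits]; rfl)
          · obtain ⟨tl, htl⟩ := hpre
            exact notYA hws.2 ⟨['a','y','a'] ++ tl, by simpa using htl⟩
        · exact ih hws.2 hna' hinf'
      | Y =>
        rw [show emit (Item.pc Pc.Y :: rest) = ['y','e'] ++ emit rest from by
          simp [emit, pcs, pY]] at hinf
        rcases infix_split hinf with ⟨j, hj, hpre⟩ | hinf'
        · simp only [List.length_cons, List.length_nil] at hj
          interval_cases j <;>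
            simp only [List.drop, List.cons_append, List.nil_append] at hpre <;>
            simp [pA, List.cons_prefix_cons] at hpre
        · exact ih hws.2 hna' hinf'
      | W =>
        rw [show emit (Item.pc Pc.W :: rest) = ['w','o','o'] ++ emit rest from by
          simp [emit, pcs, pW]] at hinf
        rcases infix_split hinf with ⟨j, hj, hpre⟩ | hinf'
        · simp only [List.length_cons, List.length_nil] at hj
          interval_cases j <;>
            simp only [List.drop, List.cons_append, List.nil_append] at hpre <;>
            simp [pA, List.cons_prefix_cons] at hpre
        · exact ih hws.2 hna' hinf'
      | M =>
        rw [show emit (Item.pc Pc.M :: rest) = ['m','a'] ++ emit rest from by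
          simp [emit, pcs, pM]] at hinf
        rcases infix_split hinf with ⟨j, hj, hpre⟩ | hinf'
        · simp only [List.length_cons, List.length_nil] at hj
          interval_cases j <;>
            simp only [List.drop, List.cons_append, List.nil_append] at hpre <;>
            simp [pA, List.cons_prefix_cons] at hpre
          obtain ⟨tl, htl⟩ := hpre
          exact notYA hws.2 ⟨['a','y','a'] ++ tl, by simpa using htl⟩
        · exact ih hws.2 hna' hinf'

theorem NC_Y {its : List Item} (hws : wsOk its = true) (hal : onlyIn [.Y, .W, .M] its = true)
    (hna : noAdj .Y its = true) :
    PySem.Chars.isIn (pY ++ pY) (emit its) = false := by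
  rw [PySem.Chars.isIn_eq_false_iff]
  revert hws hal hna
  induction its with
  | nil => intro _ _ _; simp [emit, pY]
  | cons it rest ih =>
    intro hws hal hna
    simp only [wsOk, List.all_cons, Bool.and_eq_true] at hws
    simp only [onlyIn, List.all_cons, Bool.and_eq_true] at hal
    have hna' := noAdj_tail hna
    intro hinf
    cases it with
    | sp c =>
      rw [show emit (Item.sp c :: rest) = [c] ++ emit rest from by simp [emit]] at hinf
      rcases infix_split hinf with ⟨j, hj, hpre⟩ | hinf'
      · simp only [List.length_cons, List.length_nil] at hj
        interval_cases j
        simp only [List.drop, List.cons_append, List.nil_append] at hpre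
        simp [pY, List.cons_prefix_cons] at hpre
        rw [← hpre.1] at hws
        simp [PySem.Chars.isspace] at hws
      · exact ih hws.2 hal.2 hna' hinf'
    | pc p =>
      cases p with
      | A => simp [List.contains_eq_mem] at hal
      | Y =>
        rw [show emit (Item.pc Pc.Y :: rest) = ['y','e'] ++ emit rest from by
          simp [emit, pcs, pY]] at hinf
        rcases infix_split hinf with ⟨j, hj, hpre⟩ | hinf'
        · simp only [List.length_cons, List.length_nil] at hj
          interval_cases j <;>
            simp only [List.drop, List.cons_append, List.nil_append] at hpre <;>
            simp [pY, List.cons_prefix_cons] at hpre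
          obtain ⟨tl, htl⟩ := hpre
          obtain ⟨rr, hits, -⟩ := emit_head_y hws.2 htl.symm
          exact noAdj_head hna (by rw [hits]; rfl)
        · exact ih hws.2 hal.2 hna' hinf'
      | W =>
        rw [show emit (Item.pc Pc.W :: rest) = ['w','o','o'] ++ emit rest from by
          simp [emit, pcs, pW]] at hinf
        rcases infix_split hinf with ⟨j, hj, hpre⟩ | hinf'
        · simp only [List.length_cons, List.length_nil] at hj
          interval_cases j <;>
            simp only [List.drop, List.cons_append, List.nil_append] at hpre <;>
            simp [pY, List.cons_prefix_cons] at hpre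
        · exact ih hws.2 hal.2 hna' hinf'
      | M =>
        rw [show emit (Item.pc Pc.M :: rest) = ['m','a'] ++ emit rest from by
          simp [emit, pcs, pM]] at hinf
        rcases infix_split hinf with ⟨j, hj, hpre⟩ | hinf'
        · simp only [List.length_cons, List.length_nil] at hj
          interval_cases j <;>
            simp only [List.drop, List.cons_append, List.nil_append] at hpre <;>
            simp [pY, List.cons_prefix_cons] at hpre
        · exact ih hws.2 hal.2 hna' hinf'


theorem NC_W {its : List Item} (hws : wsOk its = true) (hal : onlyIn [.W, .M] its = true)
    (hna : noAdj .W its = true) :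
    PySem.Chars.isIn (pW ++ pW) (emit its) = false := by
  rw [PySem.Chars.isIn_eq_false_iff]
  revert hws hal hna
  induction its with
  | nil => intro _ _ _; simp [emit, pW]
  | cons it rest ih =>
    intro hws hal hna
    simp only [wsOk, List.all_cons, Bool.and_eq_true] at hws
    simp only [onlyIn, List.all_cons, Bool.and_eq_true] at hal
    have hna' := noAdj_tail hna
    intro hinf
    cases it with
    | sp c =>
      rw [show emit (Item.sp c :: rest) = [c] ++ emit rest from by simp [emit]] at hinf
      rcases infix_split hinf with ⟨j, hj, hpre⟩ | hinf'
      · simp only [List.length_cons, List.length_nil] at hj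
        interval_cases j
        simp only [List.drop, List.cons_append, List.nil_append] at hpre
        simp [pW, List.cons_prefix_cons] at hpre
        rw [← hpre.1] at hws
        simp [PySem.Chars.isspace] at hws
      · exact ih hws.2 hal.2 hna' hinf'
    | pc p =>
      cases p with
      | A => simp [List.contains_eq_mem] at hal
      | Y => simp [List.contains_eq_mem] at hal
      | W =>
        rw [show emit (Item.pc Pc.W :: rest) = ['w','o','o'] ++ emit rest from by
          simp [emit, pcs, pW]] at hinf
        rcases infix_split hinf with ⟨j, hj, hpre⟩ | hinf'
        · simp only [List.length_cons, List.length_nil] at hj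
          interval_cases j <;>
            simp only [List.drop, List.cons_append, List.nil_append] at hpre <;>
            simp [pW, List.cons_prefix_cons] at hpre
          obtain ⟨tl, htl⟩ := hpre
          obtain ⟨rr, hits, -⟩ := emit_head_w hws.2 htl.symm
          exact noAdj_head hna (by rw [hits]; rfl)
        · exact ih hws.2 hal.2 hna' hinf'
      | M =>
        rw [show emit (Item.pc Pc.M :: rest) = ['m','a'] ++ emit rest from by
          simp [emit, pcs, pM]] at hinf
        rcases infix_split hinf with ⟨j, hj, hpre⟩ | hinf'
        · simp only [List.length_cons, List.length_nil] at hj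
          interval_cases j <;>
            simp only [List.drop, List.cons_append, List.nil_append] at hpre <;>
            simp [pW, List.cons_prefix_cons] at hpre
        · exact ih hws.2 hal.2 hna' hinf'


theorem NC_M {its : List Item} (hws : wsOk its = true) (hal : onlyIn [.M] its = true)
    (hna : noAdj .M its = true) :
    PySem.Chars.isIn (pM ++ pM) (emit its) = false := by
  rw [PySem.Chars.isIn_eq_false_iff]
  revert hws hal hna
  induction its with
  | nil => intro _ _ _; simp [emit, pM]
  | cons it rest ih =>
    intro hws hal hna
    simp only [wsOk, List.all_cons, Bool.and_eq_true] at hws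
    simp only [onlyIn, List.all_cons, Bool.and_eq_true] at hal
    have hna' := noAdj_tail hna
    intro hinf
    cases it with
    | sp c =>
      rw [show emit (Item.sp c :: rest) = [c] ++ emit rest from by simp [emit]] at hinf
      rcases infix_split hinf with ⟨j, hj, hpre⟩ | hinf'
      · simp only [List.length_cons, List.length_nil] at hj
        interval_cases j
        simp only [List.drop, List.cons_append, List.nil_append] at hpre
        simp [pM, List.cons_prefix_cons] at hpre
        rw [← hpre.1] at hws
        simp [PySem.Chars.isspace] at hws
      · exact ih hws.2 hal.2 hna' hinf'
    | pc p =>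
      cases p with
      | A => simp [List.contains_eq_mem] at hal
      | Y => simp [List.contains_eq_mem] at hal
      | W => simp [List.contains_eq_mem] at hal
      | M =>
        rw [show emit (Item.pc Pc.M :: rest) = ['m','a'] ++ emit rest from by
          simp [emit, pcs, pM]] at hinf
        rcases infix_split hinf with ⟨j, hj, hpre⟩ | hinf'
        · simp only [List.length_cons, List.length_nil] at hj
          interval_cases j <;>
            simp only [List.drop, List.cons_append, List.nil_append] at hpre <;>
            simp [pM, List.cons_prefix_cons] at hpre
          obtain ⟨tl, htl⟩ := hpre
          obtain ⟨rr, hits, -⟩ := emit_head_m hws.2 htl.symm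
          exact noAdj_head hna (by rw [hits]; rfl)
        · exact ih hws.2 hal.2 hna' hinf'


-- ---- persistence lemmas ----
theorem infix_cons_of {l r : List Char} {c : Char} (h : l <:+: r) : l <:+: c :: r := by
  obtain ⟨u, v, huv⟩ := h
  exact ⟨c :: u, v, by rw [← huv]; rfl⟩

theorem mem_rep {c : Char} (q : List Char) (hq : q ≠ []) :
    ∀ v, c ∈ v → c ∉ q → c ∈ rep q v := by
  suffices H : ∀ n v, v.length ≤ n → c ∈ v → c ∉ q → c ∈ rep q v by
    exact fun v => H v.length v le_rfl
  intro n
  induction n with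
  | zero =>
    intro v hlen hc _
    have : v = [] := by cases v with
      | nil => rfl
      | cons a t => simp at hlen
    subst this
    simp at hc
  | succ n ihn =>
    intro v hlen hc hcq
    cases v with
    | nil => simp at hc
    | cons c' t =>
      rw [rep]
      by_cases hp : q.isPrefixOf (c' :: t)
      · rw [if_pos hp]
        obtain ⟨r, hr⟩ := List.isPrefixOf_iff_prefix.mp hp
        obtain ⟨k, hk⟩ : ∃ k, q.length = k + 1 :=
          ⟨q.length - 1, by have := List.length_pos_iff.mpr hq; omega⟩
        have hrd : r = t.drop (q.length - 1) := by
          have hdrop := congrArg (List.drop q.length) hr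
          rw [List.drop_left] at hdrop
          rw [hdrop, hk]
          simp
        have hcr : c ∈ r := by
          rw [← hr] at hc
          rcases List.mem_append.mp hc with h' | h'
          · exact absurd h' hcq
          · exact h'
        have hlr : r.length ≤ n := by
          have := congrArg List.length hr
          simp at this
          simp at hlen
          omega
        exact List.mem_cons_of_mem _ (by rw [← hrd]; exact ihn r hlr hcr hcq)
      · rw [if_neg hp]
        rcases List.mem_cons.mp hc with rfl | h'
        · exact List.mem_cons_self
        · exact List.mem_cons_of_mem _ (ihn t (by simp at hlen; omega) h' hcq)

theorem ya_rep_Y : ∀ v, ['y','a'] <:+: v → ['y','a'] <:+: rep pY v := by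
  suffices H : ∀ n v, v.length ≤ n → ['y','a'] <:+: v → ['y','a'] <:+: rep pY v by
    exact fun v => H v.length v le_rfl
  intro n
  induction n with
  | zero =>
    intro v hlen hv
    have : v = [] := by cases v with
      | nil => rfl
      | cons a t => simp at hlen
    subst this
    simp at hv
  | succ n ihn =>
    intro v hlen hv
    cases v with
    | nil => simp at hv
    | cons c t =>
      simp only [List.length_cons] at hlen
      rw [rep]
      by_cases hp : pY.isPrefixOf (c :: t)
      · rw [if_pos hp]
        obtain ⟨r, hr⟩ := List.isPrefixOf_iff_prefix.mp hp
        simp only [pY, List.cons_append, List.nil_append, List.cons.injEq] at hr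
        obtain ⟨h1', h2'⟩ := hr
        subst h1'
        subst h2'
        rcases List.infix_cons_iff.mp hv with hpre | hv' <;>
          [skip; rcases List.infix_cons_iff.mp hv' with hpre | hv'']
        · simp [List.cons_prefix_cons] at hpre
        · simp [List.cons_prefix_cons] at hpre
        · have := ihn r (by simp at hlen; omega) hv''
          rw [show ('e' :: r).drop (pY.length - 1) = r from by simp [pY]]
          exact infix_cons_of this
      · rw [if_neg hp]
        rcases List.infix_cons_iff.mp hv with hpre | hv'
        · obtain ⟨r, hr⟩ := hpre
          simp only [List.cons_append, List.nil_append, List.cons.injEq] at hr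
          obtain ⟨rfl, ht⟩ := hr
          rw [← ht, rep_pY_skip (by decide)]
          exact ⟨[], rep pY r, rfl⟩
        · exact infix_cons_of (ihn t (by omega) hv')

theorem ya_rep_W : ∀ v, ['y','a'] <:+: v → ['y','a'] <:+: rep pW v := by
  suffices H : ∀ n v, v.length ≤ n → ['y','a'] <:+: v → ['y','a'] <:+: rep pW v by
    exact fun v => H v.length v le_rfl
  intro n
  induction n with
  | zero =>
    intro v hlen hv
    have : v = [] := by cases v with
      | nil => rfl
      | cons a t => simp at hlen
    subst this
    simp at hv
  | succ n ihn =>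
    intro v hlen hv
    cases v with
    | nil => simp at hv
    | cons c t =>
      simp only [List.length_cons] at hlen
      rw [rep]
      by_cases hp : pW.isPrefixOf (c :: t)
      · rw [if_pos hp]
        obtain ⟨r, hr⟩ := List.isPrefixOf_iff_prefix.mp hp
        simp only [pW, List.cons_append, List.nil_append, List.cons.injEq] at hr
        obtain ⟨h1', h2'⟩ := hr
        subst h1'
        subst h2'
        rcases List.infix_cons_iff.mp hv with hpre | hv' <;>
          [skip; rcases List.infix_cons_iff.mp hv' with hpre | hv'']
        · simp [List.cons_prefix_cons] at hpre
        · simp [List.cons_prefix_cons] at hpre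
        · rcases List.infix_cons_iff.mp hv'' with hpre | hv''' <;>
            [simp [List.cons_prefix_cons] at hpre; skip]
          have := ihn r (by simp at hlen; omega) hv'''
          rw [show ('o' :: 'o' :: r).drop (pW.length - 1) = r from by simp [pW]]
          exact infix_cons_of this
      · rw [if_neg hp]
        rcases List.infix_cons_iff.mp hv with hpre | hv'
        · obtain ⟨r, hr⟩ := hpre
          simp only [List.cons_append, List.nil_append, List.cons.injEq] at hr
          obtain ⟨rfl, ht⟩ := hr
          rw [← ht, rep_pW_skip (by decide)]
          exact ⟨[], rep pW r, rfl⟩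
        · exact infix_cons_of (ihn t (by omega) hv')

theorem ya_rep_M : ∀ v, ['y','a'] <:+: v → 'a' ∈ rep pM v := by
  suffices H : ∀ n v, v.length ≤ n → ['y','a'] <:+: v → 'a' ∈ rep pM v by
    exact fun v => H v.length v le_rfl
  intro n
  induction n with
  | zero =>
    intro v hlen hv
    have : v = [] := by cases v with
      | nil => rfl
      | cons a t => simp at hlen
    subst this
    simp at hv
  | succ n ihn =>
    intro v hlen hv
    cases v with
    | nil => simp at hv
    | cons c t =>
      simp only [List.length_cons] at hlen
      rw [rep]
      by_cases hp : pM.isPrefixOf (c :: t)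
      · rw [if_pos hp]
        obtain ⟨r, hr⟩ := List.isPrefixOf_iff_prefix.mp hp
        simp only [pM, List.cons_append, List.nil_append, List.cons.injEq] at hr
        obtain ⟨h1', h2'⟩ := hr
        subst h1'
        subst h2'
        rcases List.infix_cons_iff.mp hv with hpre | hv' <;>
          [skip; rcases List.infix_cons_iff.mp hv' with hpre | hv'']
        · simp [List.cons_prefix_cons] at hpre
        · simp [List.cons_prefix_cons] at hpre
        · have := ihn r (by simp at hlen; omega) hv''
          rw [show ('a' :: r).drop (pM.length - 1) = r from by simp [pM]]
          exact List.mem_cons_of_mem _ this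
      · rw [if_neg hp]
        rcases List.infix_cons_iff.mp hv with hpre | hv'
        · obtain ⟨r, hr⟩ := hpre
          simp only [List.cons_append, List.nil_append, List.cons.injEq] at hr
          obtain ⟨rfl, ht⟩ := hr
          rw [← ht, rep_pM_skip (by decide)]
          simp
        · exact List.mem_cons_of_mem _ (ihn t (by omega) hv')

theorem allSp_false_of_mem {c : Char} {v : List Char} (hc : c ∈ v)
    (hns : PySem.Chars.isspace c = false) : allSp v = false := by
  rw [Bool.eq_false_iff]
  intro hall
  simp only [allSp, List.all_eq_true] at hall
  rw [hall c hc] at hns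
  simp at hns

theorem decide_strip (v : List Char) : (decide (PySem.Chars.strip v = [])) = allSp v := by
  by_cases h : allSp v = true
  · simp [(strip_eq_nil_iff v).mpr h, h]
  · have h2 : ¬ PySem.Chars.strip v = [] := fun hh => h ((strip_eq_nil_iff v).mp hh)
    simp [h2, Bool.eq_false_iff.mpr h]

theorem aw_eq_lin (w : List Char) : aw w = lin w := by
  simp only [aw, lin]
  rw [decide_strip]
  by_cases h1 : PySem.Chars.isIn (pA ++ pA) w = true
  · rw [if_pos h1]
    have hya : ['y','a'] <:+: w := by
      refine List.IsInfix.trans ?_ ((PySem.Chars.isIn_iff_infix _ _).mp h1)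
      exact ⟨['a'], ['a','y','a'], by simp [pA]⟩
    simp only [h1, Bool.not_true, Bool.false_and]
    have h2 : ['y','a'] <:+: (if PySem.Chars.isIn (pY ++ pY) w then w else rep pY w) := by
      by_cases hc : PySem.Chars.isIn (pY ++ pY) w = true
      · rw [if_pos hc]; exact hya
      · rw [if_neg hc]; exact ya_rep_Y w hya
    generalize hg2 : (if PySem.Chars.isIn (pY ++ pY) w then w else rep pY w) = Z2 at h2 ⊢
    have h3 : ['y','a'] <:+: (if PySem.Chars.isIn (pW ++ pW) Z2 then Z2 else rep pW Z2) := by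
      by_cases hc : PySem.Chars.isIn (pW ++ pW) Z2 = true
      · rw [if_pos hc]; exact h2
      · rw [if_neg hc]; exact ya_rep_W Z2 h2
    generalize hg3 : (if PySem.Chars.isIn (pW ++ pW) Z2 then Z2 else rep pW Z2) = Z3 at h3 ⊢
    have h4 : 'a' ∈ (if PySem.Chars.isIn (pM ++ pM) Z3 then Z3 else rep pM Z3) := by
      by_cases hc : PySem.Chars.isIn (pM ++ pM) Z3 = true
      · rw [if_pos hc]; exact h3.subset (by simp)
      · rw [if_neg hc]; exact ya_rep_M Z3 h3
    generalize hg4 : (if PySem.Chars.isIn (pM ++ pM) Z3 then Z3 else rep pM Z3) = Z4 at h4 ⊢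
    exact allSp_false_of_mem h4 (by decide)
  · have h1' : PySem.Chars.isIn (pA ++ pA) w = false := Bool.eq_false_iff.mpr h1
    rw [if_neg h1]
    simp only [h1', Bool.not_false, Bool.true_and]
    by_cases h2 : PySem.Chars.isIn (pY ++ pY) (rep pA w) = true
    · rw [if_pos h2]
      simp only [h2, Bool.not_true, Bool.false_and]
      have hy : 'y' ∈ rep pA w :=
        ((PySem.Chars.isIn_iff_infix _ _).mp h2).subset (by simp [pY])
      have h3 : 'y' ∈ (if PySem.Chars.isIn (pW ++ pW) (rep pA w) then rep pA w
          else rep pW (rep pA w)) := by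
        by_cases hc : PySem.Chars.isIn (pW ++ pW) (rep pA w) = true
        · rw [if_pos hc]; exact hy
        · rw [if_neg hc]; exact mem_rep pW (by simp [pW]) _ hy (by simp [pW])
      generalize hg3 : (if PySem.Chars.isIn (pW ++ pW) (rep pA w) then rep pA w
          else rep pW (rep pA w)) = Z3 at h3 ⊢
      have h4 : 'y' ∈ (if PySem.Chars.isIn (pM ++ pM) Z3 then Z3 else rep pM Z3) := by
        by_cases hc : PySem.Chars.isIn (pM ++ pM) Z3 = true
        · rw [if_pos hc]; exact h3
        · rw [if_neg hc]; exact mem_rep pM (by simp [pM]) _ h3 (by simp [pM])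
      generalize hg4 : (if PySem.Chars.isIn (pM ++ pM) Z3 then Z3 else rep pM Z3) = Z4 at h4 ⊢
      exact allSp_false_of_mem h4 (by decide)
    · have h2' : PySem.Chars.isIn (pY ++ pY) (rep pA w) = false := Bool.eq_false_iff.mpr h2
      rw [if_neg h2]
      simp only [h2', Bool.not_false, Bool.true_and]
      by_cases h3 : PySem.Chars.isIn (pW ++ pW) (rep pY (rep pA w)) = true
      · rw [if_pos h3]
        simp only [h3, Bool.not_true, Bool.false_and]
        have hw : 'w' ∈ rep pY (rep pA w) :=
          ((PySem.Chars.isIn_iff_infix _ _).mp h3).subset (by simp [pW])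
        have h4 : 'w' ∈ (if PySem.Chars.isIn (pM ++ pM) (rep pY (rep pA w)) then rep pY (rep pA w)
            else rep pM (rep pY (rep pA w))) := by
          by_cases hc : PySem.Chars.isIn (pM ++ pM) (rep pY (rep pA w)) = true
          · rw [if_pos hc]; exact hw
          · rw [if_neg hc]; exact mem_rep pM (by simp [pM]) _ hw (by simp [pM])
        generalize hg4 : (if PySem.Chars.isIn (pM ++ pM) (rep pY (rep pA w)) then rep pY (rep pA w)
            else rep pM (rep pY (rep pA w))) = Z4 at h4 ⊢
        exact allSp_false_of_mem h4 (by decide)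
      · have h3' : PySem.Chars.isIn (pW ++ pW) (rep pY (rep pA w)) = false := Bool.eq_false_iff.mpr h3
        rw [if_neg h3]
        simp only [h3', Bool.not_false, Bool.true_and]
        by_cases h4 : PySem.Chars.isIn (pM ++ pM) (rep pW (rep pY (rep pA w))) = true
        · rw [if_pos h4]
          simp only [h4, Bool.not_true, Bool.false_and]
          have hm : 'm' ∈ rep pW (rep pY (rep pA w)) :=
            ((PySem.Chars.isIn_iff_infix _ _).mp h4).subset (by simp [pM])
          exact allSp_false_of_mem hm (by decide)
        · have h4' : PySem.Chars.isIn (pM ++ pM) (rep pW (rep pY (rep pA w))) = false :=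
            Bool.eq_false_iff.mpr h4
          rw [if_neg h4]
          simp only [h4', Bool.not_false, Bool.true_and]

-- ---- main per-word equivalence ----

theorem emit_adj_infix {q : Pc} {xs ys : List Item} :
    (pcs q ++ pcs q) <:+: emit (xs ++ .pc q :: .pc q :: ys) := by
  refine ⟨emit xs, emit ys, ?_⟩
  rw [emit_append]
  simp [emit, List.append_assoc]

theorem mapSt_adj {q q' : Pc} (h : q ≠ q') (xs ys : List Item) :
    mapSt q' (xs ++ .pc q :: .pc q :: ys) =
      mapSt q' xs ++ .pc q :: .pc q :: mapSt q' ys := by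
  simp only [mapSt, List.map_append, List.map_cons]
  rw [show (if Item.pc q = Item.pc q' then Item.sp ' ' else Item.pc q) = Item.pc q from
    if_neg (by simp [h])]

theorem lin_eq_parse (w : List Char) : lin w = solGo none w := by
  by_cases hB : solGo none w = true
  · rw [hB]
    obtain ⟨its, hws, hemit, hok⟩ := parse_items w none hB
    subst hemit
    have hws1 := wsOk_mapSt .A hws
    have hal1 := onlyIn_mapA its
    have hws2 := wsOk_mapSt .Y hws1
    have hal2 := onlyIn_mapY hal1
    have hws3 := wsOk_mapSt .W hws2
    have hal3 := onlyIn_mapW hal2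
    have hws4 := wsOk_mapSt .M hws3
    have hal4 := onlyIn_mapM hal3
    have hc1 := NC_A hws (okDup_noAdj hok .A)
    rw [lin, hc1, C_A hws]
    have hc2 := NC_Y hws1 hal1 (noAdj_mapSt (by decide) (okDup_noAdj hok .Y))
    rw [hc2, C_Y hws1 hal1]
    have hc3 := NC_W hws2 hal2
      (noAdj_mapSt (by decide) (noAdj_mapSt (by decide) (okDup_noAdj hok .W)))
    rw [hc3, C_W hws2 hal2]
    have hc4 := NC_M hws3 hal3 (noAdj_mapSt (by decide) (noAdj_mapSt (by decide)
      (noAdj_mapSt (by decide) (okDup_noAdj hok .M))))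
    rw [hc4, C_M hws3 hal3]
    rw [allSp_emit hws4 hal4]
    simp
  · rw [Bool.eq_false_iff.mpr hB]
    by_contra hL
    rw [Bool.not_eq_false] at hL
    simp only [lin, Bool.and_eq_true, Bool.not_eq_true'] at hL
    obtain ⟨⟨⟨⟨hc1, hc2⟩, hc3⟩, hc4⟩, hsp⟩ := hL
    obtain ⟨its4, hws4, hal4, hemit4⟩ := exists_items_of_allSp hsp
    obtain ⟨its3, hws3, hal3, hemit3, hmap3⟩ := PB .M [] (by decide) _ its4 hws4 hal4 hemit4
    obtain ⟨its2, hws2, hal2, hemit2, hmap2⟩ := PB .W [.M] (by decide) _ its3 hws3 hal3 hemit3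
    obtain ⟨its1, hws1, hal1, hemit1, hmap1⟩ := PB .Y [.W, .M] (by decide) _ its2 hws2 hal2 hemit2
    obtain ⟨its0, hws0, hal0, hemit0, hmap0⟩ :=
      PB .A [.Y, .W, .M] (by decide) _ its1 hws1 hal1 hemit1
    have hws1' := wsOk_mapSt .A hws0
    have hal1' := onlyIn_mapA its0
    have hws2' := wsOk_mapSt .Y hws1'
    have hal2' := onlyIn_mapY hal1'
    have hok : okDup none its0 = true := by
      by_contra hno
      have hfalse := Bool.eq_false_iff.mpr hno
      rcases okDup_false_adj its0 none hfalse with ⟨q, xs, ys, hdec⟩ | ⟨q, hq, -⟩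
      · cases q with
        | A =>
          have hinf : (pA ++ pA) <:+: w := by
            rw [← hemit0, hdec]
            exact emit_adj_infix (q := Pc.A)
          rw [(PySem.Chars.isIn_iff_infix _ _).mpr hinf] at hc1
          simp at hc1
        | Y =>
          have hinf : (pY ++ pY) <:+: rep pA w := by
            rw [← hemit0, C_A hws0, hdec, mapSt_adj (by decide)]
            exact emit_adj_infix (q := Pc.Y)
          rw [(PySem.Chars.isIn_iff_infix _ _).mpr hinf] at hc2
          simp at hc2
        | W =>
          have hinf : (pW ++ pW) <:+: rep pY (rep pA w) := by
            rw [← hemit0, C_A hws0, C_Y hws1' hal1', hdec, mapSt_adj (by decide),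
              mapSt_adj (by decide)]
            exact emit_adj_infix (q := Pc.W)
          rw [(PySem.Chars.isIn_iff_infix _ _).mpr hinf] at hc3
          simp at hc3
        | M =>
          have hinf : (pM ++ pM) <:+: rep pW (rep pY (rep pA w)) := by
            rw [← hemit0, C_A hws0, C_Y hws1' hal1', C_W hws2' hal2', hdec,
              mapSt_adj (by decide), mapSt_adj (by decide), mapSt_adj (by decide)]
            exact emit_adj_infix (q := Pc.M)
          rw [(PySem.Chars.isIn_iff_infix _ _).mpr hinf] at hc4
          simp at hc4
      · simp at hq
    exact hB (by rw [← hemit0, parse_emit its0 none hws0]; exact hok)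

theorem strdec (s : String) :
    (PySem.Str.strip s == "") = decide (PySem.Chars.strip s.toList = []) := by
  by_cases h : PySem.Chars.strip s.toList = []
  · have hs : PySem.Str.strip s = "" := String.toList_inj.mp (by simpa using h)
    simp [hs, h]
  · have hs : PySem.Str.strip s ≠ "" := by
      intro he
      apply h
      have := congrArg String.toList he
      simpa using this
    simp [h, hs]

theorem perWordStr (word : String) :
    (PySem.Str.strip (["aya", "ye", "woo", "ma"].foldl
        (fun w p => if PySem.Str.isIn (p ++ p) w then w else PySem.Str.replace w p " ") word)
      == "") = solGo none word.toList := by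
  have step : ∀ (s p : String) (pl : List Char), p.toList = pl → pl ≠ [] →
      (if PySem.Str.isIn (p ++ p) s then s else PySem.Str.replace s p " ").toList
        = (if PySem.Chars.isIn (pl ++ pl) s.toList then s.toList else rep pl s.toList) := by
    intro s p pl hp hne
    by_cases hc : PySem.Chars.isIn (pl ++ pl) s.toList = true
    · have hc2 : PySem.Str.isIn (p ++ p) s = true := by
        rw [← hp] at hc
        simpa using hc
      rw [if_pos hc2, if_pos hc]
    · have hc2 : ¬ PySem.Str.isIn (p ++ p) s = true := by
        intro hcc
        exact hc (by rw [← hp]; simpa using hcc)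
      rw [if_neg hc2, if_neg hc]
      rw [← replace_eq_rep pl s.toList hne, ← hp]
      simp [show (" " : String).toList = [' '] from by decide]
  simp only [List.foldl_cons, List.foldl_nil]
  rw [strdec]
  rw [step _ "ma" pM (by decide) (by decide)]
  rw [step _ "woo" pW (by decide) (by decide)]
  rw [step _ "ye" pY (by decide) (by decide)]
  rw [step word "aya" pA (by decide) (by decide)]
  have hfin := aw_eq_lin word.toList
  rw [lin_eq_parse] at hfin
  rw [← hfin]
  rfl

-- ===== VERDICT (by name: the statement is the Claim_ definition above) =====
theorem solution_spec : Claim_equal_solution := by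
  intro babbling _
  show solution babbling = solution_alt babbling
  unfold solution solution_alt
  have hfun : (fun (answer : Int) (word : String) =>
      let word := ["aya", "ye", "woo", "ma"].foldl
        (fun w p => if PySem.Str.isIn (p ++ p) w then w else PySem.Str.replace w p " ") word
      if PySem.Str.strip word == "" then answer + 1 else answer)
      = (fun (total : Int) (word : String) => if solGo none word.toList then total + 1 else total) := by
    funext a word
    show (if (PySem.Str.strip _ == "") = true then a + 1 else a) = _
    rw [perWordStr]
  rw [hfun]
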